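-- pv_equiv track=rewrite | github.com/tbredenoord/aoc2021 | day_3/day_3.py | process_inputs2
-- ===== SOURCE A (Python) =====
-- def process_inputs2(inputs, eq):
--     ninputs = len(inputs)
--     result_one= []
--     result_zero = []
--     for i in range(len(inputs[0])):
--         ones = len([1 for k in inputs if k[i] == '1'])
--         if (ninputs - ones) == ones:
--             result_one.append(eq)
--             result_zero.append(eq)
--             continue
--         if (ninputs - ones) > ones:
--             result_one.append("0")
--             result_zero.append("1")
--         else:
--             result_one.append("1")
--             result_zero.append("0")
--     return ["".join(result_one), "".join(result_zero)]
-- ===== SOURCE B (Python) =====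
-- def process_inputs2(inputs, eq):
--     n = len(inputs)
--     width = len(inputs[0])
--     # one row-major pass building a per-column table of '1'-counts
--     counts = [0] * width
--     for row in inputs:
--         counts = [c + (ch == '1') for c, ch in zip(counts, row)]
--     one = "".join(eq if 2 * c == n else ("0" if 2 * c < n else "1") for c in counts)
--     zero = "".join(eq if 2 * c == n else ("1" if 2 * c < n else "0") for c in counts)
--     return [one, zero]
-- ===== Notes on version B (the rewrite author's own statement) =====
-- stated objective: alternative
-- what changed: A scans the rows once per column (column-major nested scans with two append-accumulators); B makes one row-major pass over the rows building a per-column '1'-count table with zip, then derives each result string by a separate map over that table.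
import Mathlib
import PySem

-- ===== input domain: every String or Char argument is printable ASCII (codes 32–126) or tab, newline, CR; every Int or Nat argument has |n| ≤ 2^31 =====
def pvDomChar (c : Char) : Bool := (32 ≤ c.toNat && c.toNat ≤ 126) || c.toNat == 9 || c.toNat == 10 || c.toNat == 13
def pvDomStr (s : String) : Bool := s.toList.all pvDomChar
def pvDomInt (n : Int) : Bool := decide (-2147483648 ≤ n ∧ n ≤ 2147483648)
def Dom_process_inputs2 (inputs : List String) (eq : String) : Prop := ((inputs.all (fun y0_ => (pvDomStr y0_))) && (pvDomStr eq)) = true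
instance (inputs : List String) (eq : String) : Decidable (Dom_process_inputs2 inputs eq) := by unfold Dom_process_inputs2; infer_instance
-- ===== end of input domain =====

-- B replaces A's column-major nested scans by one row-major pass building a per-column
-- count table, then maps the table to the two result strings (objective: alternative).


-- ===== PORT A =====
-- 'inputs[0]' and 'k[i]' raise on inputs outside Pre_; their total `.getD` forms are only
-- relied on inside Pre_ (inputs nonempty, every row at least as long as the first).
def process_inputs2 (inputs : List String) (eq : String) : List String :=
  let ninputs : Int := PySem.List.len inputs
  let first : String := (PySem.List.pyGet? inputs 0).getD ""
  let res :=
    (PySem.List.pyRange 0 (PySem.Str.len first) 1).foldl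
      (fun (acc : List String × List String) i =>
        let ones : Int := PySem.List.len (inputs.filter (fun k => PySem.Str.pyGet? k i == some '1'))
        if ninputs - ones = ones then (acc.1 ++ [eq], acc.2 ++ [eq])
        else if ninputs - ones > ones then (acc.1 ++ ["0"], acc.2 ++ ["1"])
        else (acc.1 ++ ["1"], acc.2 ++ ["0"]))
      ([], [])
  [PySem.Str.join "" res.1, PySem.Str.join "" res.2]

-- ===== PORT B =====
def process_inputs2_alt (inputs : List String) (eq : String) : List String :=
  let n : Int := PySem.List.len inputs
  let width : Nat := ((PySem.List.pyGet? inputs 0).getD "").toList.length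
  let counts : List Int :=
    inputs.foldl
      (fun counts row =>
        (counts.zip row.toList).map (fun p => p.1 + (if p.2 = '1' then 1 else 0)))
      (List.replicate width 0)
  let one := PySem.Str.join "" (counts.map (fun c => if 2 * c = n then eq else if 2 * c < n then "0" else "1"))
  let zero := PySem.Str.join "" (counts.map (fun c => if 2 * c = n then eq else if 2 * c < n then "1" else "0"))
  [one, zero]

-- ===== PRECONDITION & SPEC =====
-- Pre_ excludes exactly the inputs where A raises: empty `inputs` (IndexError on inputs[0])
-- and rows shorter than the first row (IndexError on k[i]).
def Pre_process_inputs2 (inputs : List String) (eq : String) : Prop :=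
  inputs ≠ [] ∧ ∀ s ∈ inputs, (inputs.headD "").toList.length ≤ s.toList.length
instance (inputs : List String) (eq : String) : Decidable (Pre_process_inputs2 inputs eq) := by unfold Pre_process_inputs2; infer_instance
def pvWitness_process_inputs2 : List String × String := (["10", "01", "11"], "X")
def Spec_process_inputs2 (inputs : List String) (eq : String) (out : List String) : Prop := out = process_inputs2_alt inputs eq
instance (inputs : List String) (eq : String) (out : List String) : Decidable (Spec_process_inputs2 inputs eq out) := by unfold Spec_process_inputs2; infer_instance

-- ===== CLAIM (what is proved, stated in full; the proofs are below) =====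
def Claim_equal_process_inputs2 : Prop := ∀ (inputs : List String) (eq : String), Dom_process_inputs2 inputs eq → Pre_process_inputs2 inputs eq → Spec_process_inputs2 inputs eq (process_inputs2 inputs eq)

-- ===== LEMMAS AND PROOFS =====

-- one step of B's row loop, when the row covers all `w` columns
theorem pv_step (w : Nat) (g : Nat → Int) (cs : List Char) (h : w ≤ cs.length) :
    (((List.range w).map g).zip cs).map (fun p => p.1 + (if p.2 = '1' then 1 else 0))
      = (List.range w).map (fun i => g i + (if cs[i]? = some '1' then 1 else 0)) := by
  apply List.ext_getElem
  · simp [h]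
  · intro i h1 h2
    simp at h1
    simp [List.getElem_zip, List.getElem?_eq_getElem (by omega : i < cs.length)]

-- B's count table is the per-column countP of '1's
theorem pv_counts (rows : List String) (w : Nat) (g : Nat → Int)
    (h : ∀ r ∈ rows, w ≤ r.toList.length) :
    rows.foldl
        (fun counts row =>
          (counts.zip row.toList).map (fun p => p.1 + (if p.2 = '1' then 1 else 0)))
        ((List.range w).map g)
      = (List.range w).map
          (fun i => g i + (rows.countP (fun r => r.toList[i]? = some '1') : Int)) := by
  induction rows generalizing g with
  | nil => simp
  | cons r rows ih =>
    rw [List.foldl_cons, pv_step w g r.toList (h r (by simp)),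
        ih (fun i => g i + (if r.toList[i]? = some '1' then 1 else 0))
           (fun s hs => h s (by simp [hs]))]
    apply List.map_congr_left
    intro i _
    rw [List.countP_cons]
    split <;> rename_i hc <;> simp [hc] <;> ring

-- A's loop with two independent append-accumulators, as a pair of maps
theorem pv_pair_fold (P : Nat → Int) (N : Int) (eq : String) (w : Nat) :
    (List.range w).foldl
        (fun (acc : List String × List String) k =>
          if N - P k = P k then (acc.1 ++ [eq], acc.2 ++ [eq])
          else if N - P k > P k then (acc.1 ++ ["0"], acc.2 ++ ["1"])
          else (acc.1 ++ ["1"], acc.2 ++ ["0"]))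
        ([], [])
      = ((List.range w).map (fun k => if N - P k = P k then eq else if N - P k > P k then "0" else "1"),
         (List.range w).map (fun k => if N - P k = P k then eq else if N - P k > P k then "1" else "0")) := by
  have hb : (fun (acc : List String × List String) k =>
          if N - P k = P k then (acc.1 ++ [eq], acc.2 ++ [eq])
          else if N - P k > P k then (acc.1 ++ ["0"], acc.2 ++ ["1"])
          else (acc.1 ++ ["1"], acc.2 ++ ["0"]))
      = fun (acc : List String × List String) k =>
          ((fun (a : List String) (k : Nat) =>
              a ++ [if N - P k = P k then eq else if N - P k > P k then "0" else "1"]) acc.1 k,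
           (fun (a : List String) (k : Nat) =>
              a ++ [if N - P k = P k then eq else if N - P k > P k then "1" else "0"]) acc.2 k) := by
    funext acc k
    by_cases h1 : N - P k = P k
    · simp [h1]
    · by_cases h2 : N - P k > P k <;> simp [h1, h2]
  rw [hb, PySem.List.foldl_prod_mk
        (f := fun (a : List String) (k : Nat) =>
          a ++ [if N - P k = P k then eq else if N - P k > P k then "0" else "1"])
        (g := fun (a : List String) (k : Nat) =>
          a ++ [if N - P k = P k then eq else if N - P k > P k then "1" else "0"]),
      PySem.List.foldl_append_singleton_eq_map, PySem.List.foldl_append_singleton_eq_map]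
  simp

theorem process_inputs2_spec : Claim_equal_process_inputs2 := by
  intro inputs eq _ hpre
  obtain ⟨hne, hlen⟩ := hpre
  obtain ⟨f, rest, rfl⟩ : ∃ f r, inputs = f :: r := by
    cases inputs with
    | nil => exact absurd rfl hne
    | cons f r => exact ⟨f, r, rfl⟩
  unfold Spec_process_inputs2 process_inputs2 process_inputs2_alt
  have hget : (PySem.List.pyGet? (f :: rest) 0).getD "" = f := by
    rw [show (0 : Int) = ((0 : Nat) : Int) from rfl, PySem.List.pyGet?_natCast]; rfl
  have hsl : PySem.Str.len f = ((f.toList.length : Nat) : Int) := rfl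
  simp only [hget]
  rw [hsl, PySem.List.pyRange_zero_nat f.toList.length, List.foldl_map]
  rw [pv_pair_fold (fun k => PySem.List.len ((f :: rest).filter
        (fun r => PySem.Str.pyGet? r (k : Int) == some '1')))
      (PySem.List.len (f :: rest)) eq f.toList.length]
  have hrep : (List.replicate f.toList.length (0 : Int))
      = (List.range f.toList.length).map (fun _ => (0 : Int)) := by
    simp [List.map_const']
  rw [hrep, pv_counts (f :: rest) f.toList.length (fun _ => 0)
        (by intro r hr; simpa using hlen r hr), List.map_map, List.map_map]
  have hpt : ∀ (k : Nat),
      PySem.List.len ((f :: rest).filter (fun r => PySem.Str.pyGet? r (k : Int) == some '1'))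
        = ((f :: rest).countP (fun r => decide (r.toList[k]? = some '1')) : Int) := by
    intro k
    simp [PySem.List.len_eq, List.countP_eq_length_filter, beq_eq_decide]
  have key : ∀ (s0 s1 : String),
      (List.range f.toList.length).map (fun (k : Nat) =>
        if PySem.List.len (f :: rest)
            - PySem.List.len ((f :: rest).filter (fun r => PySem.Str.pyGet? r (k : Int) == some '1'))
            = PySem.List.len ((f :: rest).filter (fun r => PySem.Str.pyGet? r (k : Int) == some '1'))
          then eq
        else if PySem.List.len (f :: rest)
            - PySem.List.len ((f :: rest).filter (fun r => PySem.Str.pyGet? r (k : Int) == some '1'))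
            > PySem.List.len ((f :: rest).filter (fun r => PySem.Str.pyGet? r (k : Int) == some '1'))
          then s0 else s1)
      = (List.range f.toList.length).map ((fun c =>
          if 2 * c = PySem.List.len (f :: rest) then eq
          else if 2 * c < PySem.List.len (f :: rest) then s0 else s1)
         ∘ (fun i => 0 + ((f :: rest).countP (fun r => decide (r.toList[i]? = some '1')) : Int))) := by
    intro s0 s1
    apply List.map_congr_left
    intro k _
    rw [hpt k]
    simp only [PySem.List.len_eq, Function.comp, zero_add]
    split_ifs <;> first | rfl | (exfalso; omega)
  rw [key "0" "1", key "1" "0"]
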